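-- pv_equiv track=rewrite | github.com/pypi-data/pypi-mirror-403 | packages/just-bash/just_bash-0.1.9-py3-none-any.whl/just_bash/commands/grep/grep.py | _bre_to_python_regex
-- ===== SOURCE A (Python) =====
-- def _bre_to_python_regex(pattern: str) -> str:
--     """Convert BRE (Basic Regular Expression) to Python regex.
--
--     In BRE:
--     - \\| is alternation, | is literal
--     - \\+ is one-or-more, + is literal
--     - \\? is zero-or-one, ? is literal
--     - \\( \\) is grouping, ( ) are literal
--     - \\{ \\} is repetition, { } are literal
--     - \\< \\> is word boundary
--
--     In Python regex (like ERE):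
--     - | is alternation, \\| is literal
--     - + is one-or-more, \\+ is literal
--     - etc.
--     """
--     result = []
--     i = 0
--     while i < len(pattern):
--         if pattern[i] == '\\' and i + 1 < len(pattern):
--             next_char = pattern[i + 1]
--             if next_char == '|':
--                 # BRE \| -> Python |
--                 result.append('|')
--                 i += 2
--             elif next_char == '+':
--                 # BRE \+ -> Python +
--                 result.append('+')
--                 i += 2
--             elif next_char == '?':
--                 # BRE \? -> Python ?
--                 result.append('?')
--                 i += 2
--             elif next_char == '(':
--                 # BRE \( -> Python (
--                 result.append('(')
--                 i += 2
--             elif next_char == ')':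
--                 # BRE \) -> Python )
--                 result.append(')')
--                 i += 2
--             elif next_char == '{':
--                 # BRE \{ -> Python {
--                 result.append('{')
--                 i += 2
--             elif next_char == '}':
--                 # BRE \} -> Python }
--                 result.append('}')
--                 i += 2
--             elif next_char == '<':
--                 # BRE \< (word start) -> Python \b
--                 result.append(r'\b')
--                 i += 2
--             elif next_char == '>':
--                 # BRE \> (word end) -> Python \b
--                 result.append(r'\b')
--                 i += 2
--             else:
--                 # Other escapes pass through as-is
--                 result.append(pattern[i:i + 2])
--                 i += 2
--         elif pattern[i] == '|':
--             # BRE literal | -> Python \|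
--             result.append(r'\|')
--             i += 1
--         elif pattern[i] == '+':
--             # BRE literal + -> Python \+
--             result.append(r'\+')
--             i += 1
--         elif pattern[i] == '?':
--             # BRE literal ? -> Python \?
--             result.append(r'\?')
--             i += 1
--         elif pattern[i] == '(':
--             # BRE literal ( -> Python \(
--             result.append(r'\(')
--             i += 1
--         elif pattern[i] == ')':
--             # BRE literal ) -> Python \)
--             result.append(r'\)')
--             i += 1
--         elif pattern[i] == '{':
--             # BRE literal { -> Python \{
--             result.append(r'\{')
--             i += 1
--         elif pattern[i] == '}':
--             # BRE literal } -> Python \}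
--             result.append(r'\}')
--             i += 1
--         else:
--             result.append(pattern[i])
--             i += 1
--
--     return ''.join(result)
-- ===== SOURCE B (Python) =====
-- import re
--
-- _ESC = {'|': '|', '+': '+', '?': '?', '(': '(', ')': ')',
--         '{': '{', '}': '}', '<': r'\b', '>': r'\b'}
--
--
-- def _bre_to_python_regex(pattern: str) -> str:
--     def repl(m):
--         c = m.group(1)
--         if c is not None:
--             return _ESC.get(c, '\\' + c)
--         return '\\' + m.group(2)
--
--     return re.sub(r'\\(.)|([|+?(){}])', repl, pattern)
-- ===== Notes on version B (the rewrite author's own statement) =====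
-- stated objective: idiomatic
-- what changed: Replaces the hand-rolled index loop with its 18-branch if/elif ladder by a single re.sub over the tokenizer r'\\(.)|([|+?(){}])' with a callback that resolves escaped characters through a lookup table and backslash-escapes bare specials.
import Mathlib
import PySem

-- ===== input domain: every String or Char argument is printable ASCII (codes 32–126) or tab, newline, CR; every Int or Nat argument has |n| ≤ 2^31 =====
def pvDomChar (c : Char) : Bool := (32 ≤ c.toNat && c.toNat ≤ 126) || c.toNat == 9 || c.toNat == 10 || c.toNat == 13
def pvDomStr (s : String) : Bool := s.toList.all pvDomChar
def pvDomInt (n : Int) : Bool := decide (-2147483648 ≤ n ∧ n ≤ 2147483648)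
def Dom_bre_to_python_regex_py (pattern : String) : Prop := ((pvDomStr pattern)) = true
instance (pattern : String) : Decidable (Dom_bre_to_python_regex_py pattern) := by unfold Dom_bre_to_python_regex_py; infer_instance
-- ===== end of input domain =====

-- B replaces A's index loop with an 18-branch if/elif ladder by one regex substitution
-- (tokenizer \\(.)|([|+?(){}]) with a callback + escape table); objective: idiomatic, same O(n) cost.

-- ===== PORT A =====
-- literal transliteration of A's while loop: structural recursion over the char list,
-- branches in A's order, each branch appending what A appends.
def breGoA : List Char → List Char
  | [] => []
  | c :: rest =>
    if c = '\\' then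
      match rest with
      | c2 :: rest2 =>
        if c2 = '|' then '|' :: breGoA rest2
        else if c2 = '+' then '+' :: breGoA rest2
        else if c2 = '?' then '?' :: breGoA rest2
        else if c2 = '(' then '(' :: breGoA rest2
        else if c2 = ')' then ')' :: breGoA rest2
        else if c2 = '{' then '{' :: breGoA rest2
        else if c2 = '}' then '}' :: breGoA rest2
        else if c2 = '<' then '\\' :: 'b' :: breGoA rest2
        else if c2 = '>' then '\\' :: 'b' :: breGoA rest2
        else '\\' :: c2 :: breGoA rest2          -- pattern[i:i+2] as-is
      | [] =>
        -- i+1 < len fails; '\' matches none of the elif chars, final else appends it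
        ['\\']
    else if c = '|' then '\\' :: '|' :: breGoA rest
    else if c = '+' then '\\' :: '+' :: breGoA rest
    else if c = '?' then '\\' :: '?' :: breGoA rest
    else if c = '(' then '\\' :: '(' :: breGoA rest
    else if c = ')' then '\\' :: ')' :: breGoA rest
    else if c = '{' then '\\' :: '{' :: breGoA rest
    else if c = '}' then '\\' :: '}' :: breGoA rest
    else c :: breGoA rest

def bre_to_python_regex_py (pattern : String) : String :=
  String.mk (breGoA pattern.toList)

-- ===== PORT B =====
-- B's _ESC dict (insertion order) as a PySem.Dict; _ESC.get(c, '\'+c)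
def breEsc : PySem.Dict Char (List Char) :=
  PySem.Dict.ofList [('|', ['|']), ('+', ['+']), ('?', ['?']), ('(', ['(']), (')', [')']),
   ('{', ['{']), ('}', ['}']), ('<', ['\\', 'b']), ('>', ['\\', 'b'])]

-- hand port of re.sub(r'\\(.)|([|+?(){}])', repl, pattern): left-to-right scan; at each
-- position try the first alternative (backslash + any char except '\n' — '.' does not match
-- newline), then the character class; on a match emit repl(m), else copy one char.  Exact
-- for this regex/callback on all inputs.
def breGoB : List Char → List Char
  | [] => []
  | c :: rest =>
    if c = '\\' then
      match rest with
      | c2 :: rest2 =>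
        if c2 = '\n' then
          -- '.' fails on newline: no match at this position, '\' copied unchanged
          c :: breGoB (c2 :: rest2)
        else
          -- group 1 matched: _ESC.get(c2, '\' + c2)
          (breEsc.getD c2 ['\\', c2]) ++ breGoB rest2
      | [] => [c]
    else if c ∈ ['|', '+', '?', '(', ')', '{', '}'] then
      -- group 2 matched: '\' + c
      '\\' :: c :: breGoB rest
    else
      c :: breGoB rest

def bre_to_python_regex_py_alt (pattern : String) : String :=
  String.mk (breGoB pattern.toList)

-- ===== PRECONDITION & SPEC =====
def Spec_bre_to_python_regex_py (pattern : String) (out : String) : Prop := out = bre_to_python_regex_py_alt pattern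
instance (pattern : String) (out : String) : Decidable (Spec_bre_to_python_regex_py pattern out) := by unfold Spec_bre_to_python_regex_py; infer_instance

-- ===== CLAIM (what is proved, stated in full; the proofs are below) =====
def Claim_equal_bre_to_python_regex_py : Prop := ∀ (pattern : String), Dom_bre_to_python_regex_py pattern → Spec_bre_to_python_regex_py pattern (bre_to_python_regex_py pattern)

-- ===== LEMMAS AND PROOFS =====

-- breEsc as a literal Dict.mk, for rewriting lookups
theorem breEsc_eq_mk : breEsc = PySem.Dict.mk [('|', ['|']), ('+', ['+']), ('?', ['?']), ('(', ['(']), ((')' : Char), [')']),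
    ('{', ['{']), ('}', ['}']), ('<', ['\\', 'b']), ('>', ['\\', 'b'])] := by decide

-- the default branch of _ESC.get: a char that is none of the nine keys
theorem breEsc_getD_miss (c : Char) (d : List Char) (h1 : c ≠ '|') (h2 : c ≠ '+') (h3 : c ≠ '?')
    (h4 : c ≠ '(') (h5 : c ≠ ')') (h6 : c ≠ '{') (h7 : c ≠ '}') (h8 : c ≠ '<') (h9 : c ≠ '>') :
    breEsc.getD c d = d := by
  rw [breEsc_eq_mk]
  simp [PySem.Dict.getD, PySem.Dict.get?_mk_cons, PySem.Dict.get?, Ne.symm h1, Ne.symm h2,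
    Ne.symm h3, Ne.symm h4, Ne.symm h5, Ne.symm h6, Ne.symm h7, Ne.symm h8, Ne.symm h9]

theorem breGoB_nl (rest : List Char) : breGoB ('\n' :: rest) = '\n' :: breGoB rest := by
  cases rest <;> rfl

theorem breGo_eq (l : List Char) : breGoA l = breGoB l := by
  induction l using breGoA.induct with
  | case11 c2 rest2 h1 h2 h3 h4 h5 h6 h7 h8 h9 ih =>
    by_cases hn : c2 = '\n'
    · subst hn
      simp [breGoA, breGoB, breGoB_nl, ih]
    · simp only [breGoA, breGoB, ih]
      rw [breEsc_getD_miss c2 _ h1 h2 h3 h4 h5 h6 h7 h8 h9]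
      simp [h1, h2, h3, h4, h5, h6, h7, h8, h9, hn]
  | case20 c rest h1 h2 h3 h4 h5 h6 h7 h8 ih =>
    rw [breGoA.eq_def, breGoB.eq_def]
    simp [h1, h2, h3, h4, h5, h6, h7, h8, ih]
  | _ =>
    -- literal-head cases: unfold one step of each definition and compute the dict lookup
    try simp_all [breGoA, breGoB, breEsc_eq_mk, PySem.Dict.getD, PySem.Dict.get?_mk_cons,
      PySem.Dict.get?]
    try (rename_i rest ih
         rw [breGoA.eq_def, breGoB.eq_def]
         simp [ih])

-- ===== VERDICT (by name: the statement is the Claim_ definition above) =====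
theorem bre_to_python_regex_py_spec : Claim_equal_bre_to_python_regex_py := by
  intro pattern _
  unfold Spec_bre_to_python_regex_py bre_to_python_regex_py bre_to_python_regex_py_alt
  rw [breGo_eq]
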